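-- pv_equiv track=rewrite | github.com/jaredgk/PPP | pgpipe/ima_to_treemix.py | getVariantSites
-- ===== SOURCE A (Python) =====
-- def getVariantSites(seq_list):
--     idx = []
--     for i in range(len(seq_list[0])):
--         first_base = seq_list[0][i]
--         for j in range(1,len(seq_list)):
--             cur_base = seq_list[j][i]
--             if first_base != cur_base:
--                 idx.append(i)
--                 break
--     return idx
-- ===== SOURCE B (Python) =====
-- def getVariantSites(seq_list):
--     return [i for i, col in enumerate(zip(*seq_list)) if len(set(col)) > 1]
-- ===== Notes on version B (the rewrite author's own statement) =====
-- stated objective: idiomatic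
-- what changed: B transposes the sequences with zip(*seq_list) and flags each column whose set of bases has more than one element, replacing A's explicit double loop with compare-to-first and break.
-- outside the precondition, e.g. on getVariantSites([]): A raises IndexError, B returns []; on getVariantSites(['ab', 'b']): A raises IndexError, B returns [0]; on getVariantSites(['ab', 'cd', 'x']): A returns [0, 1], B returns [0]
import Mathlib
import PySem

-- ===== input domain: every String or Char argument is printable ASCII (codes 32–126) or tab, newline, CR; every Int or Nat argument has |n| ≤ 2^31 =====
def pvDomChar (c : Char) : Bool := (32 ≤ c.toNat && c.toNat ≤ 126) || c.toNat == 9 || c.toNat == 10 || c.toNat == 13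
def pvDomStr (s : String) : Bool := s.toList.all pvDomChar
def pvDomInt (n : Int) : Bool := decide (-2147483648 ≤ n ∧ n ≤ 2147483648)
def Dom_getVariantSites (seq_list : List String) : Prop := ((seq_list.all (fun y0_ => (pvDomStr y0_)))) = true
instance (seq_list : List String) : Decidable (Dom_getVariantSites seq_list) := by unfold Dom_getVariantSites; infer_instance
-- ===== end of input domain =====

-- B replaces A's explicit double loop (compare to first row, break at first mismatch) by
-- transposing with zip(*seq_list) and flagging columns whose set of bases has more than one
-- element; same cost, more idiomatic.

-- ===== PORT A =====
-- the inner 'for j in range(1, len(seq_list))' with its break: true = a mismatch was found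
def pvInnerA (seq_list : List String) (first_base : Char) (i : Int) : List Int → Bool
  | [] => false
  | j :: rest =>
      let cur_base := (PySem.Str.pyGet? ((PySem.List.pyGet? seq_list j).getD "") i).getD ' '
      if first_base ≠ cur_base then true else pvInnerA seq_list first_base i rest

def getVariantSites (seq_list : List String) : List Int :=
  let s0 := (PySem.List.pyGet? seq_list 0).getD ""   -- seq_list[0]; Pre_ excludes the raise
  (PySem.List.pyRange 0 (PySem.Str.len s0) 1).foldl
    (fun idx i =>
      let first_base := (PySem.Str.pyGet? s0 i).getD ' '
      if pvInnerA seq_list first_base i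
          (PySem.List.pyRange 1 (Int.ofNat seq_list.length) 1) then idx ++ [i] else idx)
    []

-- ===== PORT B =====
-- zip(*rows): columns until the shortest row is exhausted (first row split off structurally)
def pvColsGo : List Char → List (List Char) → List (List Char)
  | [], _ => []
  | c :: cs, rest =>
      if rest.any (fun r => r.isEmpty) then []
      else (c :: rest.map (fun r => r.headD ' ')) :: pvColsGo cs (rest.map (fun r => r.tail))

def pvCols (rows : List (List Char)) : List (List Char) :=
  match rows with
  | [] => []
  | r0 :: rest => pvColsGo r0 rest

def getVariantSites_alt (seq_list : List String) : List Int :=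
  (PySem.List.enumerate (pvCols (seq_list.map String.toList))).filterMap
    (fun p => if 1 < (PySem.Set.ofList p.2).length then some p.1 else none)

-- ===== PRECONDITION & SPEC =====
-- Pre_ excludes the empty list (A raises IndexError) and lists with a row shorter than the
-- first row: on those A either raises IndexError or, when its inner loop happens to break
-- before reaching the short row, returns a value that is an accident of iteration order.
def Pre_getVariantSites (seq_list : List String) : Prop :=
  seq_list ≠ [] ∧ ∀ s ∈ seq_list, (seq_list.headD "").toList.length ≤ s.toList.length
instance (seq_list : List String) : Decidable (Pre_getVariantSites seq_list) := by
  unfold Pre_getVariantSites; infer_instance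

def pvWitness_getVariantSites : List String := ["ACGT", "AGGT", "ACGTT"]

def Spec_getVariantSites (seq_list : List String) (out : List Int) : Prop := out = getVariantSites_alt seq_list
instance (seq_list : List String) (out : List Int) : Decidable (Spec_getVariantSites seq_list out) := by unfold Spec_getVariantSites; infer_instance

-- ===== CLAIM (what is proved, stated in full; the proofs are below) =====
def Claim_equal_getVariantSites : Prop := ∀ (seq_list : List String), Dom_getVariantSites seq_list → Pre_getVariantSites seq_list → Spec_getVariantSites seq_list (getVariantSites seq_list)

-- ===== LEMMAS AND PROOFS =====

-- the inner loop of A is an 'any' over its j-list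
theorem pvInnerA_eq_any (sl : List String) (fb : Char) (i : Int) (js : List Int) :
    pvInnerA sl fb i js
      = js.any (fun j => fb ≠ (PySem.Str.pyGet? ((PySem.List.pyGet? sl j).getD "") i).getD ' ') := by
  induction js with
  | nil => rfl
  | cons j rest ih =>
      simp only [pvInnerA, List.any_cons, ih]
      generalize ((PySem.Str.pyGet? ((PySem.List.pyGet? sl j).getD "") i).getD ' ') = cb
      by_cases h : fb = cb <;> simp [h]

-- zip(*rows) column characterisation when every other row is at least as long as the first
theorem pvColsGo_spec (r0 : List Char) :
    ∀ rs : List (List Char), (∀ r ∈ rs, r0.length ≤ r.length) →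
    pvColsGo r0 rs
      = (List.range r0.length).map
          (fun k => r0.getD k ' ' :: rs.map (fun r => r.getD k ' ')) := by
  induction r0 with
  | nil => intro rs _; simp [pvColsGo]
  | cons c cs ih =>
      intro rs h
      have hne : rs.any (fun r => r.isEmpty) = false := by
        simp only [List.any_eq_false]
        intro r hr
        have := h r hr
        cases r with
        | nil => simp at this
        | cons _ _ => simp
      have hlen : ∀ r ∈ rs.map List.tail, cs.length ≤ r.length := by
        intro r hr
        obtain ⟨r', hr', rfl⟩ := List.mem_map.mp hr
        have := h r' hr'
        cases r' <;> simp_all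
      simp only [pvColsGo, hne, Bool.false_eq_true, if_false, ih _ hlen, List.map_map]
      rw [List.length_cons, List.range_succ_eq_map, List.map_cons, List.map_map]
      congr 1
      · congr 1
        apply List.map_congr_left
        intro r _
        cases r <;> rfl
      · apply List.map_congr_left
        intro k _
        congr 1
        apply List.map_congr_left
        intro r _
        cases r <;> rfl

-- filterMap with an if is filter-then-map
theorem filterMap_if_eq {α β : Type} (q : α → Prop) [DecidablePred q] (g : α → β) (l : List α) :
    l.filterMap (fun x => if q x then some (g x) else none) = (l.filter (fun x => decide (q x))).map g := by
  induction l with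
  | nil => rfl
  | cons x xs ih =>
      by_cases h : q x <;> simp [h, ih]

-- enumerate of a map over range
theorem enumerate_map_range {α : Type} (f : Nat → α) (n : Nat) :
    PySem.List.enumerate ((List.range n).map f)
      = (List.range n).map (fun (k : Nat) => ((k : Int), f k)) := by
  induction n with
  | zero => rfl
  | succ m ih =>
      rw [List.range_succ]
      simp only [List.map_append, List.map_singleton]
      rw [PySem.List.enumerate_append]
      simp [ih, PySem.List.enumerate]

-- a nodup-free cardinality fact: two distinct members force length > 1
theorem one_lt_length_of_two_mem {α : Type} {s : List α} {a c : α}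
    (ha : a ∈ s) (hc : c ∈ s) (hne : a ≠ c) : 1 < s.length := by
  match s with
  | [] => simp at ha
  | [x] =>
      simp only [List.mem_singleton] at ha hc
      exact absurd (ha.trans hc.symm) hne
  | x :: y :: t => simp only [List.length_cons]; omega

-- |set(a :: l)| > 1  ↔  some element of l differs from a
theorem set_card_gt_one (a : Char) (l : List Char) :
    (1 < (PySem.Set.ofList (a :: l)).length) ↔ ∃ c ∈ l, c ≠ a := by
  constructor
  · intro h
    by_contra hall
    push Not at hall
    have hsub : ∀ x ∈ PySem.Set.ofList (a :: l), x = a := by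
      intro x hx
      rcases List.mem_cons.mp ((PySem.Set.mem_ofList _ _).mp hx) with h1 | h2
      · exact h1
      · exact hall x h2
    have hnd := PySem.Set.nodup_ofList (a :: l)
    revert h hsub hnd
    cases hs : PySem.Set.ofList (a :: l) with
    | nil => intro h _ _; simp at h
    | cons x s' =>
        cases s' with
        | nil => intro h _ _; simp at h
        | cons y t =>
            intro h hsub hnd
            have hx := hsub x (by simp)
            have hy := hsub y (by simp)
            have hxy : x ≠ y := by
              have := (List.nodup_cons.mp hnd).1
              intro he; exact this (he ▸ List.mem_cons_self)
            exact hxy (hx.trans hy.symm)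
  · rintro ⟨c, hc, hne⟩
    exact one_lt_length_of_two_mem
      ((PySem.Set.mem_ofList _ _).mpr List.mem_cons_self)
      ((PySem.Set.mem_ofList _ _).mpr (List.mem_cons_of_mem _ hc))
      (fun he => hne he.symm)

-- the inner loop equals the "column set has >1 element" test, column by column
theorem inner_eq_set (s : String) (rest : List String)
    (hlen : ∀ s' ∈ s :: rest, s.toList.length ≤ s'.toList.length)
    (k : Nat) (hk : k < s.toList.length) :
    pvInnerA (s :: rest) ((s.toList[k]?).getD ' ') ((k : Nat) : Int)
        (PySem.List.pyRange 1 (Int.ofNat (s :: rest).length) 1)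
      = decide (1 < (PySem.Set.ofList
          (s.toList.getD k ' ' :: (rest.map String.toList).map (fun r => r.getD k ' '))).length) := by
  have hfb : (s.toList[k]?).getD ' ' = s.toList.getD k ' ' := List.getD_eq_getElem?_getD.symm
  rw [pvInnerA_eq_any, hfb, Bool.eq_iff_iff, decide_eq_true_iff, set_card_gt_one]
  simp only [List.any_eq_true, PySem.List.mem_pyRange_one, decide_eq_true_eq]
  constructor
  · rintro ⟨j, ⟨h1, h2⟩, hdiff⟩
    have hlt : (j - 1).toNat < rest.length := by
      simp only [List.length_cons, Int.ofNat_eq_natCast] at h2; omega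
    have hj : j = (((j - 1).toNat + 1 : Nat) : Int) := by omega
    rw [hj, PySem.List.pyGet?_natCast] at hdiff
    have hget : (s :: rest)[(j - 1).toNat + 1]? = some rest[(j - 1).toNat] := by
      simp
    rw [hget, Option.getD_some, PySem.Str.pyGet?_natCast] at hdiff
    have hklt : k < (rest[(j - 1).toNat]).toList.length :=
      lt_of_lt_of_le hk (hlen _ (List.mem_cons_of_mem _ (List.getElem_mem _)))
    rw [List.getElem?_eq_getElem hklt, Option.getD_some] at hdiff
    refine ⟨rest[(j - 1).toNat].toList.getD k ' ',
      List.mem_map.mpr ⟨rest[(j - 1).toNat].toList,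
        List.mem_map.mpr ⟨rest[(j - 1).toNat], List.getElem_mem _, rfl⟩, rfl⟩, ?_⟩
    rw [List.getD_eq_getElem?_getD, List.getElem?_eq_getElem hklt, Option.getD_some]
    exact fun he => hdiff he.symm
  · rintro ⟨c, hc, hne⟩
    obtain ⟨r, hr, rfl⟩ := List.mem_map.mp hc
    obtain ⟨s', hs', rfl⟩ := List.mem_map.mp hr
    obtain ⟨t, hT, rfl⟩ := List.getElem_of_mem hs'
    refine ⟨((t + 1 : Nat) : Int), ⟨by omega, by simp only [List.length_cons, Int.ofNat_eq_natCast]; omega⟩, ?_⟩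
    rw [PySem.List.pyGet?_natCast]
    have hget : (s :: rest)[t + 1]? = some rest[t] := by
      simp [List.getElem?_eq_getElem hT]
    rw [hget, Option.getD_some, PySem.Str.pyGet?_natCast]
    have hklt : k < (rest[t]).toList.length :=
      lt_of_lt_of_le hk (hlen _ (List.mem_cons_of_mem _ (List.getElem_mem _)))
    rw [List.getElem?_eq_getElem hklt, Option.getD_some]
    rw [List.getD_eq_getElem?_getD, List.getElem?_eq_getElem hklt, Option.getD_some] at hne
    exact fun he => hne he.symm

-- ===== VERDICT (by name: the statement is the Claim_ definition above) =====
theorem getVariantSites_spec : Claim_equal_getVariantSites := by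
  intro seq_list _ hpre
  obtain ⟨hne, hlen⟩ := hpre
  unfold Spec_getVariantSites
  cases seq_list with
  | nil => exact absurd rfl hne
  | cons s rest =>
      simp only [List.headD_cons] at hlen
      -- A side: foldl-with-append = filter over the index range
      have hs0 : (PySem.List.pyGet? (s :: rest) 0).getD "" = s := by simp [PySem.List.pyGet?, PySem.List.pyIdx?]
      have hA : getVariantSites (s :: rest)
          = ((List.range s.toList.length).filter (fun k =>
              pvInnerA (s :: rest) ((s.toList[k]?).getD ' ') ((k : Nat) : Int)
                (PySem.List.pyRange 1 (Int.ofNat (s :: rest).length) 1))).map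
              (fun (k : Nat) => ((k : Nat) : Int)) := by
        unfold getVariantSites
        simp only [hs0, PySem.Str.len_eq, PySem.List.pyRange_zero_natCast, List.foldl_map]
        rw [PySem.List.foldl_append_if
          (fun (k : Nat) => pvInnerA (s :: rest) ((PySem.Str.pyGet? s ((k : Nat) : Int)).getD ' ')
            ((k : Nat) : Int) (PySem.List.pyRange 1 (Int.ofNat (s :: rest).length) 1))
          (fun (k : Nat) => ((k : Nat) : Int))]
        simp only [List.nil_append, PySem.Str.pyGet?_natCast]
      -- B side: columns of the transpose, enumerated and filtered
      have hlen' : ∀ r ∈ rest.map String.toList, s.toList.length ≤ r.length := by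
        intro r hr
        obtain ⟨s', hs', rfl⟩ := List.mem_map.mp hr
        exact hlen s' (List.mem_cons_of_mem _ hs')
      have hB : getVariantSites_alt (s :: rest)
          = ((List.range s.toList.length).filter (fun k =>
              decide (1 < (PySem.Set.ofList
                (s.toList.getD k ' ' :: (rest.map String.toList).map (fun r => r.getD k ' '))).length))).map
              (fun (k : Nat) => ((k : Nat) : Int)) := by
        unfold getVariantSites_alt
        have hmap : (s :: rest).map String.toList = s.toList :: rest.map String.toList := rfl
        rw [hmap]
        show (PySem.List.enumerate (pvColsGo s.toList (rest.map String.toList))).filterMap _ = _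
        rw [pvColsGo_spec _ _ hlen', enumerate_map_range,
          filterMap_if_eq (fun p : Int × List Char => 1 < (PySem.Set.ofList p.2).length) (fun p => p.1),
          List.filter_map, List.map_map]
        rfl
      rw [hA, hB]
      congr 1
      apply List.filter_congr
      intro k hk
      exact inner_eq_set s rest hlen k (List.mem_range.mp hk)
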